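-- pv_equiv track=rewrite | github.com/simonelusetti/RatCon | utils/aggregate_xps.py | parse_run_id
-- ===== SOURCE A (Python) =====
-- def parse_run_id(overrides: list[str]) -> int | None:
--     for item in reversed(overrides):
--         if item.startswith("run="):
--             try:
--                 return int(item.split("=", 1)[1])
--             except ValueError:
--                 return None
--     return None
-- ===== SOURCE B (Python) =====
-- def parse_run_id(overrides: list[str]) -> int | None:
--     matches = [s for s in overrides if s.startswith("run=")]
--     if not matches:
--         return None
--     try:
--         return int(matches[-1].split("=", 1)[1])
--     except ValueError:
--         return None
-- ===== Notes on version B (the rewrite author's own statement) =====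
-- stated objective: simpler
-- what changed: B separates finding the last 'run=' override (filter the list, take the last element) from parsing it, instead of A's fused reversed early-returning scan.
import Mathlib
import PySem

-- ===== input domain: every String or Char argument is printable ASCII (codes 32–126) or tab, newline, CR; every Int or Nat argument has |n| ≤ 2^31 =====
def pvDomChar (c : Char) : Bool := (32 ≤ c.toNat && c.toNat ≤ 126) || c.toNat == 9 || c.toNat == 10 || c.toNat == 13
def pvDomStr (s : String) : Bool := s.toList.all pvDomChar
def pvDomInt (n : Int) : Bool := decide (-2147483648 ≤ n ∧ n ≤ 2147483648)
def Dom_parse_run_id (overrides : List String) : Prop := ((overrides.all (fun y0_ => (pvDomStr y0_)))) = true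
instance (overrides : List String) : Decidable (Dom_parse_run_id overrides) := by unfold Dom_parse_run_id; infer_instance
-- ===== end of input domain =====

-- B separates finding the last "run=" override (filter, take the last) from parsing it,
-- instead of A's fused reversed early-returning scan. Same O(n) cost; objective: simpler.

-- ===== PORT A =====
-- scan of `reversed(overrides)`: first item starting with "run=" is parsed (ValueError → none).
-- the inner `pyGet? parts 1` can only be `some` here (startswith guarantees a "="), so the
-- `none` branch mirrors an unreachable IndexError.
def parse_run_id_go (items : List String) : Option Int :=
  match items with
  | [] => none
  | item :: rest =>
    if PySem.Str.startswith item "run=" then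
      match PySem.Str.splitMax? item "=" 1 with
      | some parts => (PySem.List.pyGet? parts 1).bind PySem.Int.ofStr?
      | none => none
    else parse_run_id_go rest

def parse_run_id (overrides : List String) : Option Int :=
  parse_run_id_go overrides.reverse

-- ===== PORT B =====
def parse_run_id_alt (overrides : List String) : Option Int :=
  let hits := overrides.filter (fun s => PySem.Str.startswith s "run=")
  match hits.getLast? with
  | none => none
  | some m =>
    match PySem.Str.splitMax? m "=" 1 with
    | some parts => (PySem.List.pyGet? parts 1).bind PySem.Int.ofStr?
    | none => none

-- ===== PRECONDITION & SPEC =====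
def Spec_parse_run_id (overrides : List String) (out : Option Int) : Prop := out = parse_run_id_alt overrides
instance (overrides : List String) (out : Option Int) : Decidable (Spec_parse_run_id overrides out) := by unfold Spec_parse_run_id; infer_instance

-- ===== CLAIM (what is proved, stated in full; the proofs are below) =====
def Claim_equal_parse_run_id : Prop := ∀ (overrides : List String), Dom_parse_run_id overrides → Spec_parse_run_id overrides (parse_run_id overrides)

-- ===== LEMMAS AND PROOFS =====

-- shared parse step, used only by the proofs to name the common tail computation
def pvParse (m : String) : Option Int :=
  match PySem.Str.splitMax? m "=" 1 with
  | some parts => (PySem.List.pyGet? parts 1).bind PySem.Int.ofStr?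
  | none => none

-- A's scan returns the parse of the FIRST match of its argument
theorem go_eq_head (items : List String) :
    parse_run_id_go items =
      match (items.filter (fun s => PySem.Str.startswith s "run=")).head? with
      | none => none
      | some m => pvParse m := by
  induction items with
  | nil => rfl
  | cons item rest ih =>
    by_cases h : PySem.Str.startswith item "run=" = true
    all_goals simp [PySem.Str.startswith] at h
    · simp [parse_run_id_go, List.filter_cons, h, pvParse]
    · simp [parse_run_id_go, List.filter_cons, h, ih]

-- ===== VERDICT (by name: the statement is the Claim_ definition above) =====
theorem parse_run_id_spec : Claim_equal_parse_run_id := by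
  intro overrides _
  unfold Spec_parse_run_id parse_run_id parse_run_id_alt
  rw [go_eq_head]
  simp [List.filter_reverse, List.head?_reverse, pvParse]
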